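-- pv_equiv track=rewrite | github.com/deepak-kumar-biswal/pr-approver-agent | lambdas/tf_plan_parser.py | _collect_modules
-- ===== SOURCE A (Python) =====
-- from typing import Any, Dict, List, Tuple, Set
--
-- def _collect_modules(address: str) -> List[str]:
--     # terraform addresses like: module.foo.module.bar.aws_iam_role.this
--     parts = address.split(".")
--     modules = []
--     i = 0
--     while i < len(parts):
--         if parts[i] == "module" and i + 1 < len(parts):
--             modules.append(f"module.{parts[i+1]}")
--             i += 2
--         else:
--             i += 1
--     return modules
-- ===== SOURCE B (Python) =====
-- import re
--
-- _MODULE_RE = re.compile(r"(?:^|\.)module\.([^.]*)")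
--
-- def _collect_modules(address: str):
--     # regex scan: 'module.' at a segment boundary, capturing the (possibly empty) name
--     return [f"module.{name}" for name in _MODULE_RE.findall(address)]
-- ===== Notes on version B (the rewrite author's own statement) =====
-- stated objective: idiomatic
-- what changed: Replaces the split-into-parts plus manual index walk (skip 2 on a match, else skip 1) with a single regex findall scan that matches the module keyword at a segment boundary followed by a dot and captures the possibly-empty name run up to the next dot.
import Mathlib
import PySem

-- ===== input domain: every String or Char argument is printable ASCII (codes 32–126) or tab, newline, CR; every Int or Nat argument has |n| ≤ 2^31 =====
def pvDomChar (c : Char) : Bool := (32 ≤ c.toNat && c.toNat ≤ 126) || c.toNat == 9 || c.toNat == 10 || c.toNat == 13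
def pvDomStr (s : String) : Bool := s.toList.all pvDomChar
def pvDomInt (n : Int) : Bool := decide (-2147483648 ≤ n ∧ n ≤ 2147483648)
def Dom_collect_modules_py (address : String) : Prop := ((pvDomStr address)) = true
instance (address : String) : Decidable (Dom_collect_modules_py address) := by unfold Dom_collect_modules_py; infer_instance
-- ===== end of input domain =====

-- B replaces A's split-then-index-walk with a single regex findall scan,
-- ported as a boundary-tracking character scanner; objective: idiomatic.


-- ===== PORT A =====
-- the while-loop of A, as index recursion over `parts`
def collectA_loop (parts : List String) (i : Nat) : List String :=
  if _h : i < parts.length then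
    if parts[i]! = "module" ∧ i + 1 < parts.length then
      ("module." ++ parts[i+1]!) :: collectA_loop parts (i+2)
    else
      collectA_loop parts (i+1)
  else []
termination_by parts.length - i

def collect_modules_py (address : String) : List String :=
  match PySem.Str.split? address "." with
  | some parts => collectA_loop parts 0
  | none => []   -- unreachable: the separator "." is nonempty

-- ===== PORT B =====
-- hand port (exact for this fixed pattern) of re.findall(r"(?:^|\.)module\.([^.]*)", address):
-- scan left to right; `boundary` records whether the position is the start of the string or
-- just after a '.', where '(?:^|\.)' can have matched; on a match, capture the maximal run of
-- non-dots and resume after it (boundary again iff the last consumed char was the '.').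
def pvScanB (boundary : Bool) (cs : List Char) : List (List Char) :=
  if h : boundary = true ∧ "module.".toList.isPrefixOf cs = true then
    (cs.drop 7).takeWhile (· != '.') ::
      pvScanB ((cs.drop 7).takeWhile (· != '.')).isEmpty ((cs.drop 7).dropWhile (· != '.'))
  else
    match cs with
    | [] => []
    | c :: rest => pvScanB (c == '.') rest
termination_by cs.length
decreasing_by
  · have hp := List.IsPrefix.length_le (List.isPrefixOf_iff_prefix.mp h.2)
    have hd := List.length_dropWhile_le (fun c => c != '.') (cs.drop 7)
    simp at hp hd ⊢
    omega
  · simp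

def collect_modules_py_alt (address : String) : List String :=
  (pvScanB true address.toList).map (fun name => "module." ++ String.ofList name)

-- ===== PRECONDITION & SPEC =====
def Spec_collect_modules_py (address : String) (out : List String) : Prop := out = collect_modules_py_alt address
instance (address : String) (out : List String) : Decidable (Spec_collect_modules_py address out) := by unfold Spec_collect_modules_py; infer_instance

-- ===== CLAIM (what is proved, stated in full; the proofs are below) =====
def Claim_equal_collect_modules_py : Prop := ∀ (address : String), Dom_collect_modules_py address → Spec_collect_modules_py address (collect_modules_py address)

-- ===== LEMMAS AND PROOFS =====

-- splitting on '.' as plain structural recursion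
def splitDot : List Char → List (List Char)
  | [] => [[]]
  | c :: rest => if c = '.' then [] :: splitDot rest else (splitDot rest).modifyHead (c :: ·)

-- the pairing skeleton shared by both programs, on char-list parts
def goC : List (List Char) → List (List Char)
  | x :: p :: rest => if x = "module".toList then p :: goC rest else goC (p :: rest)
  | _ => []

-- the same skeleton on string parts (what A's loop computes)
def goA : List String → List String
  | x :: p :: rest => if x = "module" then ("module." ++ p) :: goA rest else goA (p :: rest)
  | _ => []

theorem splitDot_ne_nil (l : List Char) : splitDot l ≠ [] := by
  induction l with
  | nil => simp [splitDot]
  | cons c rest ih =>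
    simp only [splitDot]
    split
    · simp
    · cases hsr : splitDot rest with
      | nil => exact absurd hsr ih
      | cons a t => simp

theorem goC_cons_ne (x : List Char) (l : List (List Char)) (hx : x ≠ "module".toList) :
    goC (x :: l) = goC l := by
  cases l with
  | nil => rfl
  | cons p rest => simp only [goC]; rw [if_neg hx]

-- fuel-indexed splitOn.go computes splitDot
theorem splitOn_go_eq (fuel : Nat) :
    ∀ (l cur : List Char) (acc : List (List Char)), l.length ≤ fuel →
      PySem.Chars.splitOn.go ['.'] fuel l cur acc
        = acc.reverse ++ (splitDot l).modifyHead (cur.reverse ++ ·) := by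
  induction fuel with
  | zero =>
    intro l cur acc hl
    have : l = [] := by cases l <;> simp_all
    subst this
    simp [PySem.Chars.splitOn.go, splitDot]
  | succ n ih =>
    intro l cur acc hl
    cases l with
    | nil => simp [PySem.Chars.splitOn.go, splitDot]
    | cons c rest =>
      by_cases hc : c = '.'
      · subst hc
        have hpre : List.isPrefixOf ['.'] ('.' :: rest) = true := by
          simp [List.isPrefixOf]
        simp only [PySem.Chars.splitOn.go, hpre, if_true, List.length_cons,
          List.length_nil, Nat.zero_add, List.drop_succ_cons, List.drop_zero] at *
        rw [ih rest [] (cur.reverse :: acc) (by omega)]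
        cases hsr : splitDot rest with
        | nil => exact absurd hsr (splitDot_ne_nil rest)
        | cons a t => simp [splitDot, hsr]
      · have hpre : List.isPrefixOf ['.'] (c :: rest) = false := by
          simp [List.isPrefixOf]
          intro h; exact absurd h.symm hc
        simp only [PySem.Chars.splitOn.go, hpre, Bool.false_eq_true, if_false,
          List.length_cons] at *
        rw [ih rest (c :: cur) acc (by omega)]
        cases hsr : splitDot rest with
        | nil => exact absurd hsr (splitDot_ne_nil rest)
        | cons a t => simp [splitDot, hsr, hc]

theorem splitOn_eq_splitDot (l : List Char) :
    PySem.Chars.splitOn l ['.'] = splitDot l := by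
  have := splitOn_go_eq (l.length + 1) l [] [] (by omega)
  cases hsr : splitDot l with
  | nil => exact absurd hsr (splitDot_ne_nil l)
  | cons a t => simpa [PySem.Chars.splitOn, hsr] using this

-- head/tail characterization of splitDot
theorem splitDot_char (r : List Char) :
    splitDot r = r.takeWhile (· != '.') ::
      (match r.dropWhile (· != '.') with | [] => [] | _ :: r' => splitDot r') := by
  induction r with
  | nil => simp [splitDot]
  | cons c rest ih =>
    by_cases hc : c = '.'
    · subst hc; simp [splitDot, List.takeWhile, List.dropWhile]
    · have hb : (c != '.') = true := by simpa using hc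
      simp only [splitDot, if_neg hc, List.takeWhile_cons, List.dropWhile_cons, hb, if_true, ih]
      rfl

theorem splitDot_prefix (w : List Char) (r : List Char) (hw : ∀ c ∈ w, c ≠ '.') :
    splitDot (w ++ '.' :: r) = w :: splitDot r := by
  induction w with
  | nil => simp [splitDot]
  | cons c w' ih =>
    have hc : c ≠ '.' := hw c (by simp)
    simp only [List.cons_append, splitDot, if_neg hc,
      ih (fun d hd => hw d (by simp [hd]))]
    rfl

theorem mdl_eq : "module".toList = ['m','o','d','u','l','e'] := rfl

theorem goC_nil : goC [] = [] := rfl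
theorem goC_single (x : List Char) : goC [x] = [] := rfl

theorem dropWhile_head_false (p : Char → Bool) (l r : List Char) (c : Char)
    (h : l.dropWhile p = c :: r) : p c = false := by
  induction l with
  | nil => simp at h
  | cons a l' ih =>
    rw [List.dropWhile_cons] at h
    split at h
    · exact ih h
    · cases h; simp_all

theorem scanB_nil (b : Bool) : pvScanB b [] = [] := by
  rw [pvScanB]
  simp

theorem scan_eq (n : Nat) : ∀ cs : List Char, cs.length ≤ n →
    pvScanB true cs = goC (splitDot cs) ∧ pvScanB false cs = goC (splitDot cs).tail := by
  induction n with
  | zero =>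
    intro cs h
    have : cs = [] := by cases cs <;> simp_all
    subst this
    exact ⟨by simp [scanB_nil, splitDot, goC_single], by simp [scanB_nil, splitDot, goC_nil]⟩
  | succ n ih =>
    intro cs hlen
    have hfalse : pvScanB false cs = goC (splitDot cs).tail := by
      cases cs with
      | nil => simp [scanB_nil, splitDot, goC_nil]
      | cons c rest =>
        rw [pvScanB]
        simp only [Bool.false_eq_true, false_and, dif_neg, not_false_iff]
        by_cases hc : c = '.'
        · subst hc
          simp only [beq_self_eq_true]
          rw [(ih rest (by simp at hlen; omega)).1]
          simp [splitDot]
        · have hb : (c == '.') = false := by simpa using hc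
          rw [hb, (ih rest (by simp at hlen; omega)).2]
          simp only [splitDot, if_neg hc]
          cases hsr : splitDot rest with
          | nil => exact absurd hsr (splitDot_ne_nil rest)
          | cons a t => simp
    refine ⟨?_, hfalse⟩
    by_cases hpre : "module.".toList.isPrefixOf cs = true
    · -- a match at this boundary
      have hcs : cs = "module.".toList ++ cs.drop 7 := by
        have h7 : "module.".toList = cs.take 7 := by
          have := List.prefix_iff_eq_take.mp (List.isPrefixOf_iff_prefix.mp hpre)
          simpa using this
        conv_lhs => rw [← List.take_append_drop 7 cs, ← h7]
      have hlen7 : 7 ≤ cs.length := by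
        have := List.IsPrefix.length_le (List.isPrefixOf_iff_prefix.mp hpre)
        simpa using this
      rw [pvScanB, dif_pos ⟨rfl, hpre⟩]
      set rest := cs.drop 7 with hrest
      have hsplit : splitDot cs = "module".toList :: splitDot rest := by
        rw [hcs]
        have : ("module.".toList : List Char) ++ rest = "module".toList ++ '.' :: rest := by
          simp
        rw [this, splitDot_prefix _ _ (by rw [mdl_eq]; simp)]
      rw [hsplit, splitDot_char rest]
      simp only [goC]
      refine congrArg _ ?_
      cases hr : rest.dropWhile (· != '.') with
      | nil => simp [scanB_nil, goC]
      | cons c' r'' =>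
        have hc' : c' = '.' := by
          have := dropWhile_head_false _ _ _ _ hr
          simpa using this
        subst hc'
        rw [pvScanB]
        have hnp : "module.".toList.isPrefixOf ('.' :: r'') = false := by
          simp [List.isPrefixOf]
        simp only [hnp, Bool.false_eq_true, and_false, dif_neg, not_false_iff,
          beq_self_eq_true]
        have hr'' : r''.length ≤ n := by
          have h1 : rest.length ≤ cs.length - 7 := by rw [hrest]; simp
          have h2 : (rest.dropWhile (· != '.')).length ≤ rest.length :=
            List.length_dropWhile_le _ _
          rw [hr] at h2
          simp at h2
          omega
        exact (ih r'' hr'').1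
    · -- no match at this boundary
      cases cs with
      | nil => simp [scanB_nil, splitDot, goC]
      | cons c rest =>
        rw [pvScanB, dif_neg (fun hcon => hpre hcon.2)]
        change pvScanB (c == '.') rest = _
        by_cases hc : c = '.'
        · subst hc
          simp only [beq_self_eq_true]
          rw [(ih rest (by simp at hlen; omega)).1]
          simp only [splitDot]
          exact (goC_cons_ne _ _ (by rw [mdl_eq]; simp)).symm
        · have hb : (c == '.') = false := by simpa using hc
          rw [hb, (ih rest (by simp at hlen; omega)).2]
          simp only [splitDot, if_neg hc]
          rw [splitDot_char rest]
          cases ht : (match rest.dropWhile (· != '.') with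
              | [] => ([] : List (List Char)) | _ :: r' => splitDot r') with
          | nil => simp [goC]
          | cons u t' =>
            simp only [List.modifyHead_cons, List.tail_cons]
            have hne : c :: rest.takeWhile (· != '.') ≠ "module".toList := by
              intro heq
              apply hpre
              -- c :: takeWhile = "module".toList and dropWhile nonempty starting with '.'
              have hdw : ∃ r', rest.dropWhile (· != '.') = '.' :: r' := by
                cases hdr : rest.dropWhile (· != '.') with
                | nil => rw [hdr] at ht; simp at ht
                | cons d r' =>
                  have hd : d = '.' := by
                    have := dropWhile_head_false _ _ _ _ hdr
                    simpa using this
                  exact ⟨r', by rw [hd]⟩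
              obtain ⟨r', hr'⟩ := hdw
              have hrest : rest = rest.takeWhile (· != '.') ++ '.' :: r' := by
                conv_lhs => rw [← List.takeWhile_append_dropWhile (p := (· != '.')) (l := rest)]
                rw [hr']
              rw [List.isPrefixOf_iff_prefix]
              refine ⟨r', ?_⟩
              rw [hrest, ← List.cons_append, heq]
              simp
            rw [goC_cons_ne _ _ hne]

theorem goA_cons_ne (x : String) (l : List String) (hx : x ≠ "module") :
    goA (x :: l) = goA l := by
  cases l with
  | nil => rfl
  | cons p rest => simp only [goA]; rw [if_neg hx]

theorem loopA_eq (parts : List String) : ∀ (k i : Nat), parts.length - i ≤ k →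
    collectA_loop parts i = goA (parts.drop i) := by
  intro k
  induction k with
  | zero =>
    intro i hk
    have hge : parts.length ≤ i := by omega
    rw [collectA_loop, dif_neg (by omega), List.drop_eq_nil_of_le hge]
    rfl
  | succ k ih =>
    intro i hk
    by_cases hi : i < parts.length
    · have hdrop : parts.drop i = parts[i] :: parts.drop (i+1) :=
        List.drop_eq_getElem_cons hi
      have hgi : parts[i]! = parts[i] := getElem!_pos parts i hi
      rw [collectA_loop, dif_pos hi]
      by_cases hcond : parts[i]! = "module" ∧ i + 1 < parts.length
      · obtain ⟨hm, hi1⟩ := hcond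
        rw [if_pos ⟨hm, hi1⟩]
        have hdrop1 : parts.drop (i+1) = parts[i+1] :: parts.drop (i+2) :=
          List.drop_eq_getElem_cons hi1
        rw [hdrop, hdrop1, goA, if_pos (by rw [← hgi]; exact hm)]
        rw [ih (i+2) (by omega), getElem!_pos parts (i+1) hi1]
      · rw [if_neg hcond, ih (i+1) (by omega), hdrop]
        by_cases hm : parts[i] = "module"
        · have hi1 : ¬ i + 1 < parts.length := by
            intro h; exact hcond ⟨by rw [hgi]; exact hm, h⟩
          have : parts.drop (i+1) = [] := List.drop_eq_nil_of_le (by omega)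
          rw [this]
          rfl
        · exact (goA_cons_ne _ _ hm).symm
    · rw [collectA_loop, dif_neg hi, List.drop_eq_nil_of_le (by omega)]
      rfl

theorem goA_map (l : List (List Char)) :
    goA (l.map String.ofList) = (goC l).map (fun nm => "module." ++ String.ofList nm) := by
  induction hn : l.length using Nat.strong_induction_on generalizing l with
  | _ n ih =>
    match l with
    | [] => rfl
    | [x] => rfl
    | x :: p :: rest =>
      simp only [List.map_cons, goA, goC]
      by_cases hx : x = "module".toList
      · rw [if_pos (by rw [hx]; rfl), if_pos hx]
        simp only [List.map_cons]
        rw [ih rest.length (by simp at hn; omega) rest rfl]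
      · have hx' : String.ofList x ≠ "module" := by
          intro h
          exact hx (by have := congrArg String.toList h; simpa using this)
        rw [if_neg hx', if_neg hx]
        exact ih (p :: rest).length (by simp at hn ⊢; omega) (p :: rest) rfl

-- ===== VERDICT (by name: the statement is the Claim_ definition above) =====
theorem collect_modules_py_spec : Claim_equal_collect_modules_py := by
  intro address _
  show collect_modules_py address = collect_modules_py_alt address
  unfold collect_modules_py collect_modules_py_alt
  rw [show PySem.Str.split? address "." =
      some (((splitDot address.toList).map String.ofList)) by
    simp [PySem.Str.split?, PySem.Chars.split?, splitOn_eq_splitDot]]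
  change collectA_loop ((splitDot address.toList).map String.ofList) 0 = _
  rw [loopA_eq ((splitDot address.toList).map String.ofList)
      ((splitDot address.toList).map String.ofList).length 0 (by omega), List.drop_zero, goA_map,
    (scan_eq address.toList.length address.toList (le_refl _)).1]
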